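-- pv_equiv track=rewrite | github.com/shivasai0-0/LEETCODE | 4068-sum-of-elements-with-frequency-divisible-by-k/4068-sum-of-elements-with-frequency-divisible-by-k.py | sumDivisibleByK
-- ===== SOURCE A (Python) =====
-- from typing import List
--
-- def sumDivisibleByK(nums: List[int], k: int) -> int:
--     freq={i:0 for i in nums}
--     for i in nums:
--         freq[i]+=1
--     count=0
--     for i in freq:
--         if(freq[i]%k==0):
--             count+=i*freq[i]
--     return count
-- ===== SOURCE B (Python) =====
-- from typing import List
--
-- def sumDivisibleByK(nums: List[int], k: int) -> int:
--     # Sort a copy, then sum maximal runs of equal values whose length is divisible by k.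
--     total = 0
--     run_val = 0
--     run_len = 0
--     for x in sorted(nums):
--         if x == run_val and run_len > 0:
--             run_len += 1
--         else:
--             if run_len and run_len % k == 0:
--                 total += run_val * run_len
--             run_val, run_len = x, 1
--     if run_len and run_len % k == 0:
--         total += run_val * run_len
--     return total
-- ===== Notes on version B (the rewrite author's own statement) =====
-- stated objective: alternative
-- what changed: Replaces the dict-based frequency counting (build a dict of zeros, count in a second pass, then iterate the dict) by a sort-then-scan: sort a copy of nums and sum maximal runs of equal consecutive values whose length is divisible by k, with no dict at all.
import Mathlib
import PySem

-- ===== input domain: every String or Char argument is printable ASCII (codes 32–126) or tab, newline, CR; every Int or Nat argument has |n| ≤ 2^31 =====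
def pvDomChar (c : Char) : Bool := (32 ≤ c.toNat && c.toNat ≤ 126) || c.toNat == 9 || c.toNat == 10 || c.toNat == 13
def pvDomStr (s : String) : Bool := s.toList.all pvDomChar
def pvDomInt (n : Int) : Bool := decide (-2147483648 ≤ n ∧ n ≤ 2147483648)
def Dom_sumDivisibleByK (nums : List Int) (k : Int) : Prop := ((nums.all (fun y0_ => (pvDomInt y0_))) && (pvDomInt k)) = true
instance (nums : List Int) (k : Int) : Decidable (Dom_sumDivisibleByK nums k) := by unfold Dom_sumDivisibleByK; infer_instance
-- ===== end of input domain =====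

-- B differs from A only in algorithm (sort-then-group-runs instead of a dict of counts); same return value everywhere A returns.

-- ===== PORT A =====
def sumDivisibleByK (nums : List Int) (k : Int) : Int :=
  -- freq = {i:0 for i in nums}
  let freq0 := nums.foldl (fun d i => d.insert i (0 : Int)) (PySem.Dict.empty)
  -- for i in nums: freq[i] += 1   (key always present, so Dict.modify is exact)
  let freq := nums.foldl (fun d i => d.modify i 0 (· + 1)) freq0
  -- for i in freq: if freq[i] % k == 0: count += i * freq[i]
  freq.keys.foldl (fun count i =>
    if PySem.Int.mod (freq.getD i 0) k == 0 then count + i * freq.getD i 0 else count) 0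

-- ===== PORT B =====
-- state = (total, run_val, run_len)
def stepB (k : Int) (st : Int × Int × Int) (x : Int) : Int × Int × Int :=
  if x == st.2.1 && decide (0 < st.2.2) then (st.1, st.2.1, st.2.2 + 1)
  else ((if st.2.2 != 0 && (PySem.Int.mod st.2.2 k == 0) then st.1 + st.2.1 * st.2.2 else st.1), x, 1)

-- if run_len and run_len % k == 0: total += run_val * run_len
def flushB (k : Int) (st : Int × Int × Int) : Int :=
  if st.2.2 != 0 && (PySem.Int.mod st.2.2 k == 0) then st.1 + st.2.1 * st.2.2 else st.1

def sumDivisibleByK_alt (nums : List Int) (k : Int) : Int :=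
  flushB k ((PySem.List.sorted nums (fun x => x) false).foldl (stepB k) (0, 0, 0))

-- ===== PRECONDITION & SPEC =====
-- Pre_ excludes exactly the inputs where the Python A raises ZeroDivisionError: k = 0 with a nonempty nums
-- (on nums = [] both loops are empty and A returns 0 for any k, so those inputs stay inside Pre_).
def Pre_sumDivisibleByK (nums : List Int) (k : Int) : Prop := nums = [] ∨ k ≠ 0
instance (nums : List Int) (k : Int) : Decidable (Pre_sumDivisibleByK nums k) := by
  unfold Pre_sumDivisibleByK; infer_instance
def pvWitness_sumDivisibleByK : List Int × Int := ([1, 2, 2], 2)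
def Spec_sumDivisibleByK (nums : List Int) (k : Int) (out : Int) : Prop := out = sumDivisibleByK_alt nums k
instance (nums : List Int) (k : Int) (out : Int) : Decidable (Spec_sumDivisibleByK nums k out) := by unfold Spec_sumDivisibleByK; infer_instance

-- ===== CLAIM (what is proved, stated in full; the proofs are below) =====
def Claim_equal_sumDivisibleByK : Prop := ∀ (nums : List Int) (k : Int), Dom_sumDivisibleByK nums k → Pre_sumDivisibleByK nums k → Spec_sumDivisibleByK nums k (sumDivisibleByK nums k)

-- ===== LEMMAS AND PROOFS =====

-- contribution of one distinct value u of the multiset m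
def contrib (k : Int) (m : List Int) (u : Int) : Int :=
  if PySem.Int.mod (m.count u : Int) k == 0 then u * (m.count u : Int) else 0

-- the common semantics: sum of contributions over the distinct values of m
def H (k : Int) (m : List Int) : Int := ((PySem.Set.ofList m).map (contrib k m)).sum

theorem foldl_if_sum (p : Int → Bool) (f : Int → Int) :
    ∀ (L : List Int) (a : Int),
      L.foldl (fun acc u => if p u then acc + f u else acc) a
        = a + (L.map (fun u => if p u then f u else 0)).sum := by
  intro L
  induction L with
  | nil => intro a; simp
  | cons x xs ih =>
    intro a
    simp only [List.foldl_cons, List.map_cons, List.sum_cons, ih]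
    split <;> ring

theorem sum_contrib_eq_H (k : Int) (m : List Int) (L : List Int)
    (hnd : L.Nodup) (hm : ∀ x, x ∈ L ↔ x ∈ m) :
    (L.map (contrib k m)).sum = H k m := by
  have hperm : L.Perm (PySem.Set.ofList m) := by
    rw [List.perm_ext_iff_of_nodup hnd (PySem.Set.nodup_ofList m)]
    intro a; rw [hm, PySem.Set.mem_ofList]
  exact (hperm.map (contrib k m)).sum_eq

theorem H_perm (k : Int) (m m' : List Int) (h : m.Perm m') : H k m = H k m' := by
  have hc : contrib k m' = contrib k m := by
    funext u; unfold contrib; rw [h.count_eq]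
  have := sum_contrib_eq_H k m (PySem.Set.ofList m') (PySem.Set.nodup_ofList m')
    (fun x => by rw [PySem.Set.mem_ofList, h.mem_iff])
  rw [← this]
  unfold H
  rw [hc]

theorem H_replicate_append (k : Int) (v : Int) (c : Nat) (m : List Int)
    (hc : 0 < c) (hv : v ∉ m) :
    H k (List.replicate c v ++ m)
      = (if PySem.Int.mod (c : Int) k == 0 then v * (c : Int) else 0) + H k m := by
  have hcnt_v : ((List.replicate c v ++ m).count v : Int) = (c : Int) := by
    simp [List.count_append, List.count_eq_zero_of_not_mem hv]
  have hcnt_u : ∀ u ∈ PySem.Set.ofList m, ((List.replicate c v ++ m).count u : Int) = (m.count u : Int) := by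
    intro u hu
    have hum : u ∈ m := (PySem.Set.mem_ofList m u).mp hu
    have huv : u ≠ v := fun h => hv (h ▸ hum)
    have : (v == u) = false := by simp; exact fun h => huv h.symm
    simp [List.count_append, List.count_replicate, this]
  have hnd : (v :: PySem.Set.ofList m).Nodup := by
    refine List.nodup_cons.mpr ⟨fun h => hv ((PySem.Set.mem_ofList m v).mp h), PySem.Set.nodup_ofList m⟩
  have hmem : ∀ x, x ∈ (v :: PySem.Set.ofList m) ↔ x ∈ List.replicate c v ++ m := by
    intro x
    simp only [List.mem_cons, PySem.Set.mem_ofList, List.mem_append, List.mem_replicate]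
    constructor
    · rintro (rfl | h)
      · left; exact ⟨by omega, rfl⟩
      · right; exact h
    · rintro (⟨_, rfl⟩ | h)
      · left; rfl
      · right; exact h
  have h1 := sum_contrib_eq_H k (List.replicate c v ++ m) (v :: PySem.Set.ofList m) hnd hmem
  rw [← h1, List.map_cons, List.sum_cons]
  congr 1
  · unfold contrib; rw [hcnt_v]
  · have : (PySem.Set.ofList m).map (contrib k (List.replicate c v ++ m))
        = (PySem.Set.ofList m).map (contrib k m) := by
      apply List.map_congr_left
      intro u hu; unfold contrib; rw [hcnt_u u hu]
    rw [this]
    exact sum_contrib_eq_H k m (PySem.Set.ofList m) (PySem.Set.nodup_ofList m)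
      (fun x => PySem.Set.mem_ofList m x)

theorem H_nil (k : Int) : H k [] = 0 := rfl

-- ===== B side: the run fold computes H on a sorted list =====
theorem runfold_eq (k : Int) :
    ∀ (s : List Int), s.Pairwise (· ≤ ·) →
      ∀ (t v : Int) (c : Nat), 0 < c → (∀ x ∈ s, v ≤ x) →
        flushB k (s.foldl (stepB k) (t, v, (c : Int)))
          = t + H k (List.replicate c v ++ s) := by
  intro s
  induction s with
  | nil =>
    intro _ t v c hc _
    simp only [List.foldl_nil]
    rw [H_replicate_append k v c [] hc (by simp), H_nil]
    unfold flushB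
    have hcne : ((c : Int) != 0) = true := by
      simp [bne_iff_ne]; omega
    simp only [hcne, Bool.true_and]
    split <;> simp
  | cons x s ih =>
    intro hs t v c hc hv
    have hxs : ∀ y ∈ s, x ≤ y := fun y hy => (List.pairwise_cons.mp hs).1 y hy
    have hs' : s.Pairwise (· ≤ ·) := (List.pairwise_cons.mp hs).2
    have hvx : v ≤ x := hv x (by simp)
    simp only [List.foldl_cons]
    by_cases hxv : x = v
    · have hstep : stepB k (t, v, (c : Int)) x = (t, v, ((c + 1 : Nat) : Int)) := by
        unfold stepB
        have : (x == v && decide ((0:Int) < (c : Int))) = true := by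
          simp [hxv]; omega
        simp only [this]
        push_cast; rfl
      rw [hstep, ih hs' t v (c + 1) (by omega)
            (fun y hy => hxv ▸ hv y (by simp [hy]))]
      congr 2
      rw [List.replicate_succ' (n := c)]
      simp [hxv]
    · have hvltx : v < x := lt_of_le_of_ne hvx (fun h => hxv h.symm)
      have hvnot : v ∉ x :: s := by
        intro h
        rcases List.mem_cons.mp h with h | h
        · exact hxv h.symm
        · exact absurd (lt_of_lt_of_le hvltx (hxs v h)) (lt_irrefl v)
      have hstep : stepB k (t, v, (c : Int)) x
          = ((if PySem.Int.mod (c : Int) k == 0 then t + v * (c : Int) else t), x, ((1 : Nat) : Int)) := by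
        unfold stepB
        have hcond : (x == v && decide ((0:Int) < (c : Int))) = false := by
          simp [hxv]
        have hcne : ((c : Int) != 0) = true := by simp [bne_iff_ne]; omega
        simp only [hcond, Bool.false_eq_true, if_false, hcne, Bool.true_and]
        push_cast; rfl
      rw [hstep, ih hs' _ x 1 (by omega) hxs]
      rw [H_replicate_append k v c (x :: s) hc hvnot]
      simp only [List.replicate_one, List.singleton_append]
      split <;> ring

-- ===== A side: the dict fold computes H =====
theorem getD_zeroinit :
    ∀ (l : List Int) (d : PySem.Dict Int Int), (∀ v, d.getD v 0 = 0) →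
      ∀ v, (l.foldl (fun d i => d.insert i (0 : Int)) d).getD v 0 = 0 := by
  intro l
  induction l with
  | nil => intro d hd v; exact hd v
  | cons x xs ih =>
    intro d hd v
    apply ih
    intro u
    by_cases hux : u = x
    · subst hux; simp [PySem.Dict.getD_insert_self]
    · rw [PySem.Dict.getD_insert_of_ne]
      · exact hd u
      · exact fun h => hux h

theorem update_self_eq (l : List Int) : ∀ (s : PySem.Set Int), (∀ x ∈ l, x ∈ s) → PySem.Set.update s l = s := by
  induction l with
  | nil => intro s _; rfl
  | cons x xs ih =>
    intro s hs
    have : PySem.Set.add s x = s := by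
      unfold PySem.Set.add
      simp [PySem.Set.contains_eq_listContains, List.contains_eq_mem, hs x (by simp)]
    calc PySem.Set.update s (x :: xs) = PySem.Set.update (PySem.Set.add s x) xs := rfl
      _ = PySem.Set.update s xs := by rw [this]
      _ = s := ih s (fun y hy => hs y (by simp [hy]))

theorem A_eq_H (nums : List Int) (k : Int) : sumDivisibleByK nums k = H k nums := by
  show (nums.foldl (fun d i => d.modify i 0 (· + 1))
      (nums.foldl (fun d i => d.insert i (0 : Int)) (PySem.Dict.empty))).keys.foldl
        (fun count i =>
          if PySem.Int.mod ((nums.foldl (fun d i => d.modify i 0 (· + 1))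
            (nums.foldl (fun d i => d.insert i (0 : Int)) (PySem.Dict.empty))).getD i 0) k == 0
          then count + i * (nums.foldl (fun d i => d.modify i 0 (· + 1))
            (nums.foldl (fun d i => d.insert i (0 : Int)) (PySem.Dict.empty))).getD i 0 else count) 0
      = H k nums
  set freq0 := nums.foldl (fun d i => d.insert i (0 : Int)) (PySem.Dict.empty) with hfreq0
  set freq := nums.foldl (fun d i => d.modify i 0 (· + 1)) freq0 with hfreq
  have hget : ∀ v, freq.getD v 0 = (nums.count v : Int) := by
    intro v
    rw [hfreq, PySem.Dict.getD_foldl_modify_add_one,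
        getD_zeroinit nums PySem.Dict.empty (by intro u; simp [PySem.Dict.getD_empty]) v]
    ring
  have hkeys : freq.keys = PySem.Set.ofList nums := by
    rw [hfreq, PySem.Dict.keys_foldl_modify, hfreq0, PySem.Dict.keys_foldl_insert]
    have h0 : (PySem.Dict.empty : PySem.Dict Int Int).keys = ([] : List Int) := PySem.Dict.keys_empty
    rw [h0]
    have h1 : PySem.Set.update ([] : PySem.Set Int) nums = PySem.Set.ofList nums := by
      rw [PySem.Set.ofList_eq_foldl]; rfl
    rw [h1]
    exact update_self_eq nums (PySem.Set.ofList nums) (fun x hx => (PySem.Set.mem_ofList nums x).mpr hx)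
  have hfun : (fun (count : Int) (i : Int) =>
        if PySem.Int.mod (freq.getD i 0) k == 0 then count + i * freq.getD i 0 else count)
      = (fun (count : Int) (i : Int) =>
        if (fun u => PySem.Int.mod (nums.count u : Int) k == 0) i then count + (fun u => u * (nums.count u : Int)) i else count) := by
    funext count i; rw [hget i]
  rw [hkeys, hfun, foldl_if_sum]
  simp only [zero_add]
  have : ((PySem.Set.ofList nums).map
      (fun u => if PySem.Int.mod ((nums.count u : Nat) : Int) k == 0 then u * (nums.count u : Int) else 0))
      = (PySem.Set.ofList nums).map (contrib k nums) := by
    apply List.map_congr_left; intro u _; unfold contrib; rfl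
  rw [this]; rfl

theorem B_eq_H (nums : List Int) (k : Int) : sumDivisibleByK_alt nums k = H k nums := by
  unfold sumDivisibleByK_alt
  rcases hS : PySem.List.sorted nums (fun x => x) false with _ | ⟨m, tS⟩
  · have hnil : nums = [] := (PySem.List.sorted_eq_nil_iff nums (fun x => x) false).mp hS
    subst hnil
    rfl
  · have hperm : (m :: tS).Perm nums := hS ▸ PySem.List.sorted_perm nums (fun x => x) false
    have hpw : (m :: tS).Pairwise (· ≤ ·) := by
      have := PySem.List.sorted_pairwise nums (fun x => x)
      rw [hS] at this; exact this
    have hstep0 : stepB k (0, 0, 0) m = (0, m, ((1 : Nat) : Int)) := by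
      unfold stepB; simp
    rw [List.foldl_cons, hstep0,
        runfold_eq k tS (List.pairwise_cons.mp hpw).2 0 m 1 (by omega)
          (fun y hy => (List.pairwise_cons.mp hpw).1 y hy)]
    rw [zero_add, List.replicate_one, List.singleton_append]
    exact H_perm k (m :: tS) nums hperm

-- ===== VERDICT (by name: the statement is the Claim_ definition above) =====
theorem sumDivisibleByK_spec : Claim_equal_sumDivisibleByK := by
  intro nums k _ _
  unfold Spec_sumDivisibleByK
  rw [A_eq_H, B_eq_H]
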